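-- pv_equiv track=rewrite | github.com/lzy1732008/Algorithm | Bytedance2019.py | rewards
-- ===== SOURCE A (Python) =====
-- def rewards(scores):
--     r = [1] * len(scores)
--     while True:
--         nums = 0
--         for i in range(len(scores)):
--             left = (i - 1 + len(scores)) % len(scores)
--             right = (i + 1) % len(scores)
--             temp = -1
--             if scores[i] > scores[left]:
--                 if r[i] <= r[left]:
--                     temp = r[left] + 1
--
--             if scores[i] > scores[right]:
--                 if r[i] <= r[right]:
--                     temp = max(r[right] + 1, temp)
--             if temp > -1:
--                 r[i] = temp
--                 nums += 1
--         if nums == 0: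
--             break
--     return sum(r)
-- ===== SOURCE B (Python) =====
-- def rewards(scores):
--     n = len(scores)
--     order = sorted(range(n), key=lambda i: scores[i])
--     r = [1] * n
--     for i in order:
--         left = (i - 1 + n) % n
--         right = (i + 1) % n
--         val = 1
--         if scores[left] < scores[i]:
--             val = max(val, r[left] + 1)
--         if scores[right] < scores[i]:
--             val = max(val, r[right] + 1)
--         r[i] = val
--     return sum(r)
-- ===== Notes on version B (the rewrite author's own statement) =====
-- stated objective: faster
-- what changed: Replaces A's repeated full-array relaxation passes (iterate until no candy value changes) by a single pass over the indices sorted by score ascending, where each index's final value is computed once from its already-finalized smaller-score neighbors.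
import Mathlib
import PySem

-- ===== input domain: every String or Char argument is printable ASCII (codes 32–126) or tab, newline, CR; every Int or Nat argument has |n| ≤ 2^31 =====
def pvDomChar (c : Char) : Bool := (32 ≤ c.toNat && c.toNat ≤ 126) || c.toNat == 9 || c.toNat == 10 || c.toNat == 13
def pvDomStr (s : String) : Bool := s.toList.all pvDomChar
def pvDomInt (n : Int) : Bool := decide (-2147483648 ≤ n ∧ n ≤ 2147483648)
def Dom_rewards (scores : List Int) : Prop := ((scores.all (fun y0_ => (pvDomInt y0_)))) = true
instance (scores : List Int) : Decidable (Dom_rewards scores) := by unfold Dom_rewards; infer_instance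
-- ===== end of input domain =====

-- B replaces A's repeated relaxation passes by one pass over the indices sorted by
-- score ascending (each value computed once from already-final smaller neighbors): faster.

-- ===== PORT A =====
-- All list indices below are in [0, len); List.getD / List.set are exact there.
-- Python's (i - 1 + n) % n equals (i + n - 1) % n on 0 ≤ i < n.
def aStep (scores : List Int) (st : List Int × Int) (i : Nat) : List Int × Int :=
  let n := scores.length
  let r := st.1
  let left := (i + n - 1) % n
  let right := (i + 1) % n
  let temp : Int := -1
  let temp := if scores.getD i 0 > scores.getD left 0 ∧ r.getD i 0 ≤ r.getD left 0
              then r.getD left 0 + 1 else temp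
  let temp := if scores.getD i 0 > scores.getD right 0 ∧ r.getD i 0 ≤ r.getD right 0
              then max (r.getD right 0 + 1) temp else temp
  if temp > -1 then (r.set i temp, st.2 + 1) else (r, st.2)

-- one 'for i in range(len(scores))' pass; st.2 is nums
def aPass (scores r : List Int) : List Int × Int :=
  (List.range scores.length).foldl (aStep scores) (r, 0)

-- 'while True: … if nums == 0: break'; the loop reaches its fixed point in at most
-- n*n passes (proved below via aLoop_fix), so the fuel n*n+1 never runs out.
def aLoop (scores : List Int) (fuel : Nat) (r : List Int) : List Int :=
  match fuel with
  | 0 => r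
  | fuel+1 =>
    let p := aPass scores r
    if p.2 = 0 then p.1 else aLoop scores fuel p.1

def rewards (scores : List Int) : Int :=
  (aLoop scores (scores.length * scores.length + 1) (List.replicate scores.length 1)).sum

-- ===== PORT B =====
def bStep (scores : List Int) (r : List Int) (i : Nat) : List Int :=
  let n := scores.length
  let left := (i + n - 1) % n
  let right := (i + 1) % n
  let val : Int := 1
  let val := if scores.getD left 0 < scores.getD i 0 then max val (r.getD left 0 + 1) else val
  let val := if scores.getD right 0 < scores.getD i 0 then max val (r.getD right 0 + 1) else val
  r.set i val

def rewards_alt (scores : List Int) : Int :=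
  let n := scores.length
  let order := PySem.List.sorted (List.range n) (fun i => scores.getD i 0) false
  (order.foldl (bStep scores) (List.replicate n 1)).sum

-- ===== PRECONDITION & SPEC =====
def Spec_rewards (scores : List Int) (out : Int) : Prop := out = rewards_alt scores
instance (scores : List Int) (out : Int) : Decidable (Spec_rewards scores out) := by unfold Spec_rewards; infer_instance

-- ===== CLAIM (what is proved, stated in full; the proofs are below) =====
def Claim_equal_rewards : Prop := ∀ (scores : List Int), Dom_rewards scores → Spec_rewards scores (rewards scores)

-- ===== LEMMAS AND PROOFS =====

-- number of indices with strictly smaller score: the termination measure for chainM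
def mu (scores : List Int) (i : Nat) : Nat :=
  ((Finset.range scores.length).filter (fun j => scores.getD j 0 < scores.getD i 0)).card

lemma mu_lt (scores : List Int) (i j : Nat) (hj : j < scores.length)
    (h : scores.getD j 0 < scores.getD i 0) : mu scores j < mu scores i := by
  apply Finset.card_lt_card
  constructor
  · intro k hk
    simp only [Finset.mem_filter, Finset.mem_range] at *
    exact ⟨hk.1, hk.2.trans h⟩
  · intro hsub
    have hji : j ∈ (Finset.range scores.length).filter
        (fun k => scores.getD k 0 < scores.getD i 0) := by
      simp only [Finset.mem_filter, Finset.mem_range]; exact ⟨hj, h⟩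
    have := hsub hji
    simp only [Finset.mem_filter, Finset.mem_range] at this
    exact absurd this.2 (lt_irrefl _)

lemma getD_lt_pos (scores : List Int) (i j : Nat)
    (h : scores.getD j 0 < scores.getD i 0) : 0 < scores.length := by
  rcases Nat.eq_zero_or_pos scores.length with h0 | h0
  · rw [List.length_eq_zero_iff] at h0; subst h0; simp at h
  · exact h0

-- the minimal valid candy value at index i (length of longest strictly decreasing
-- neighbor chain starting at i)
def chainM (scores : List Int) (i : Nat) : Int :=
  let n := scores.length
  let a : Int := if h : scores.getD ((i + n - 1) % n) 0 < scores.getD i 0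
                 then chainM scores ((i + n - 1) % n) + 1 else 1
  let b : Int := if h : scores.getD ((i + 1) % n) 0 < scores.getD i 0
                 then chainM scores ((i + 1) % n) + 1 else 1
  max 1 (max a b)
termination_by mu scores i
decreasing_by
  · exact mu_lt scores i _ (Nat.mod_lt _ (getD_lt_pos scores i _ h)) h
  · exact mu_lt scores i _ (Nat.mod_lt _ (getD_lt_pos scores i _ h)) h

lemma chainM_eq (scores : List Int) (i : Nat) :
    chainM scores i =
      max 1 (max
        (if scores.getD ((i + scores.length - 1) % scores.length) 0 < scores.getD i 0
         then chainM scores ((i + scores.length - 1) % scores.length) + 1 else 1)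
        (if scores.getD ((i + 1) % scores.length) 0 < scores.getD i 0
         then chainM scores ((i + 1) % scores.length) + 1 else 1)) := by
  rw [chainM]; simp only [dite_eq_ite]

lemma one_le_chainM (scores : List Int) (i : Nat) : 1 ≤ chainM scores i := by
  rw [chainM_eq]; exact le_max_left _ _

lemma chainM_left_le (scores : List Int) (i : Nat)
    (h : scores.getD ((i + scores.length - 1) % scores.length) 0 < scores.getD i 0) :
    chainM scores ((i + scores.length - 1) % scores.length) + 1 ≤ chainM scores i := by
  rw [chainM_eq scores i]
  refine le_trans ?_ (le_max_right _ _)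
  rw [if_pos h]
  exact le_max_left _ _

lemma chainM_right_le (scores : List Int) (i : Nat)
    (h : scores.getD ((i + 1) % scores.length) 0 < scores.getD i 0) :
    chainM scores ((i + 1) % scores.length) + 1 ≤ chainM scores i := by
  rw [chainM_eq scores i]
  refine le_trans ?_ (le_max_right _ _)
  rw [if_pos h]
  exact le_max_right _ _

lemma chainM_le_mu_aux (scores : List Int) : ∀ k i, mu scores i ≤ k → chainM scores i ≤ (mu scores i : Int) + 1 := by
  intro k
  induction k with
  | zero =>
    intro i h
    rw [chainM_eq]
    have h1 : ¬ scores.getD ((i + scores.length - 1) % scores.length) 0 < scores.getD i 0 := by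
      intro hc
      have := mu_lt scores i _ (Nat.mod_lt _ (getD_lt_pos scores i _ hc)) hc
      omega
    have h2 : ¬ scores.getD ((i + 1) % scores.length) 0 < scores.getD i 0 := by
      intro hc
      have := mu_lt scores i _ (Nat.mod_lt _ (getD_lt_pos scores i _ hc)) hc
      omega
    rw [if_neg h1, if_neg h2]
    simp
  | succ k ih =>
    intro i h
    rw [chainM_eq]
    refine max_le (by omega) (max_le ?_ ?_)
    · split_ifs with hc
      · have hlt := mu_lt scores i _ (Nat.mod_lt _ (getD_lt_pos scores i _ hc)) hc
        have := ih ((i + scores.length - 1) % scores.length) (by omega)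
        omega
      · omega
    · split_ifs with hc
      · have hlt := mu_lt scores i _ (Nat.mod_lt _ (getD_lt_pos scores i _ hc)) hc
        have := ih ((i + 1) % scores.length) (by omega)
        omega
      · omega

lemma chainM_le_mu (scores : List Int) (i : Nat) :
    chainM scores i ≤ (mu scores i : Int) + 1 :=
  chainM_le_mu_aux scores (mu scores i) i le_rfl

lemma chainM_le_bound (scores : List Int) (i : Nat) :
    chainM scores i ≤ (scores.length : Int) + 1 := by
  refine le_trans (chainM_le_mu scores i) ?_
  have : mu scores i ≤ scores.length := by
    refine le_trans (Finset.card_filter_le _ _) ?_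
    simp
  omega

-- list-update helpers
lemma sum_set_int (l : List Int) (i : Nat) (v : Int) (h : i < l.length) :
    (l.set i v).sum = l.sum + v - l.getD i 0 := by
  rw [List.sum_set, if_pos h]
  have hd : l.drop i = l[i] :: l.drop (i+1) := List.drop_eq_getElem_cons h
  have hs : (l.take i).sum + (l.drop i).sum = l.sum := by
    rw [← List.sum_append, List.take_append_drop]
  rw [hd] at hs
  simp only [List.sum_cons] at hs
  rw [List.getD_eq_getElem l 0 h]
  omega

lemma getD_set_self (l : List Int) (i : Nat) (v : Int) (h : i < l.length) :
    (l.set i v).getD i 0 = v := by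
  rw [List.getD_eq_getElem _ _ (by simpa using h)]
  simp

lemma getD_set_ne (l : List Int) (i j : Nat) (v : Int) (h : j ≠ i) :
    (l.set i v).getD j 0 = l.getD j 0 := by
  simp [List.getD, List.getElem?_set_ne (Ne.symm h)]

-- invariant maintained by A's relaxation loop
def AInv (scores r : List Int) : Prop :=
  r.length = scores.length ∧
  ∀ i < scores.length, 1 ≤ r.getD i 0 ∧ r.getD i 0 ≤ chainM scores i

-- "no candy constraint is violated at i" (the fixed-point condition of A's loop)
def NoViol (scores r : List Int) (i : Nat) : Prop :=
  ¬(scores.getD i 0 > scores.getD ((i + scores.length - 1) % scores.length) 0 ∧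
    r.getD i 0 ≤ r.getD ((i + scores.length - 1) % scores.length) 0) ∧
  ¬(scores.getD i 0 > scores.getD ((i + 1) % scores.length) 0 ∧
    r.getD i 0 ≤ r.getD ((i + 1) % scores.length) 0)

lemma set_preserves (scores r : List Int) (i : Nat) (T : Int) (hi : i < scores.length)
    (hInv : AInv scores r) (hT1 : r.getD i 0 + 1 ≤ T) (hT2 : T ≤ chainM scores i) :
    AInv scores (r.set i T) ∧ r.sum + 1 ≤ (r.set i T).sum := by
  obtain ⟨hlen, hbnd⟩ := hInv
  have hir : i < r.length := by omega
  constructor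
  · refine ⟨by simp [hlen], ?_⟩
    intro j hj
    by_cases hji : j = i
    · subst hji
      rw [getD_set_self _ _ _ hir]
      have := (hbnd j hj).1
      exact ⟨by omega, hT2⟩
    · rw [getD_set_ne _ _ _ _ hji]
      exact hbnd j hj
  · rw [sum_set_int _ _ _ hir]
    omega

lemma aStep_facts (scores r : List Int) (c : Int) (i : Nat) (hi : i < scores.length)
    (hInv : AInv scores r) :
    AInv scores (aStep scores (r, c) i).1 ∧ r.sum ≤ (aStep scores (r, c) i).1.sum ∧
    ((aStep scores (r, c) i).2 = c ∧ (aStep scores (r, c) i).1 = r ∧ NoViol scores r i ∨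
     (aStep scores (r, c) i).2 = c + 1 ∧ r.sum + 1 ≤ (aStep scores (r, c) i).1.sum) := by
  obtain ⟨hlen, hbnd⟩ := hInv
  have hpos : 0 < scores.length := by omega
  obtain ⟨hlf1, hlf2⟩ := hbnd _ (Nat.mod_lt (i + scores.length - 1) hpos)
  obtain ⟨hrt1, hrt2⟩ := hbnd _ (Nat.mod_lt (i + 1) hpos)
  obtain ⟨hi1, hi2⟩ := hbnd i hi
  simp only [aStep]
  split_ifs with g2 g1 hout1 hout2 g1' hout3 hout4
  · -- g2, g1, update with max(rt+1, lf+1)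
    dsimp only
    have hclf := chainM_left_le scores i g1.1
    have hcrt := chainM_right_le scores i g2.1
    obtain ⟨g1a, g1b⟩ := g1
    obtain ⟨g2a, g2b⟩ := g2
    have hsp := set_preserves scores r i
      (max (r.getD ((i + 1) % scores.length) 0 + 1)
           (r.getD ((i + scores.length - 1) % scores.length) 0 + 1))
      hi ⟨hlen, hbnd⟩ (by omega) (by omega)
    have hs2 := hsp.2
    exact ⟨hsp.1, by omega, Or.inr ⟨rfl, hs2⟩⟩
  · exact absurd (by omega) hout1
  · -- g2, ¬g1, update with max(rt+1, -1)
    dsimp only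
    have hcrt := chainM_right_le scores i g2.1
    obtain ⟨g2a, g2b⟩ := g2
    have hone := one_le_chainM scores i
    have hsp := set_preserves scores r i
      (max (r.getD ((i + 1) % scores.length) 0 + 1) (-1))
      hi ⟨hlen, hbnd⟩ (by omega) (by omega)
    have hs2 := hsp.2
    exact ⟨hsp.1, by omega, Or.inr ⟨rfl, hs2⟩⟩
  · exact absurd (by omega) hout2
  · -- ¬g2, g1, update with lf+1
    dsimp only
    have hclf := chainM_left_le scores i g1'.1
    obtain ⟨g1a, g1b⟩ := g1'
    have hsp := set_preserves scores r i
      (r.getD ((i + scores.length - 1) % scores.length) 0 + 1)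
      hi ⟨hlen, hbnd⟩ (by omega) (by omega)
    have hs2 := hsp.2
    exact ⟨hsp.1, by omega, Or.inr ⟨rfl, hs2⟩⟩
  · exact absurd (by omega) hout3
  · exact absurd hout4 (by omega)
  · exact ⟨⟨hlen, hbnd⟩, le_refl _, Or.inl ⟨rfl, rfl, g1', g2⟩⟩

lemma aFold_facts (scores : List Int) (L : List Nat) :
    ∀ (r : List Int) (c : Int), (∀ i ∈ L, i < scores.length) → AInv scores r →
    AInv scores (L.foldl (aStep scores) (r, c)).1 ∧
    r.sum ≤ (L.foldl (aStep scores) (r, c)).1.sum ∧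
    c ≤ (L.foldl (aStep scores) (r, c)).2 ∧
    ((L.foldl (aStep scores) (r, c)).2 = c →
        (L.foldl (aStep scores) (r, c)).1 = r ∧ ∀ i ∈ L, NoViol scores r i) ∧
    ((L.foldl (aStep scores) (r, c)).2 ≠ c → r.sum + 1 ≤ (L.foldl (aStep scores) (r, c)).1.sum) := by
  induction L with
  | nil =>
    intro r c _ hInv
    simp only [List.foldl_nil]
    refine ⟨hInv, le_refl _, le_refl _, ?_, ?_⟩
    · intro _
      refine ⟨trivial, ?_⟩
      intro j hj
      simp at hj
    · intro h
      exact absurd rfl h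
  | cons i tl ih =>
    intro r c hmem hInv
    have hi : i < scores.length := hmem i (by simp)
    have htl : ∀ j ∈ tl, j < scores.length := fun j hj => hmem j (List.mem_cons_of_mem _ hj)
    have hstep := aStep_facts scores r c i hi hInv
    simp only [List.foldl_cons]
    rcases hstep.2.2 with ⟨hc, hr, hnv⟩ | ⟨hc, hsum⟩
    · have heq : aStep scores (r, c) i = (r, c) := by
        rw [Prod.ext_iff]; exact ⟨hr, hc⟩
      rw [heq]
      obtain ⟨A1, A2, A3, A4, A5⟩ := ih r c htl hInv
      refine ⟨A1, A2, A3, ?_, A5⟩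
      intro h0
      obtain ⟨hre, hnv'⟩ := A4 h0
      refine ⟨hre, fun j hj => ?_⟩
      rcases List.mem_cons.mp hj with rfl | hj'
      · exact hnv
      · exact hnv' j hj'
    · have hpair : ((aStep scores (r, c) i).1, (aStep scores (r, c) i).2) =
          aStep scores (r, c) i := rfl
      obtain ⟨A1, A2, A3, A4, A5⟩ :=
        ih (aStep scores (r, c) i).1 (aStep scores (r, c) i).2 htl hstep.1
      rw [hpair] at A1 A2 A3 A4 A5
      have hsum1 := hstep.2.1
      refine ⟨A1, le_trans hsum1 A2, by omega, ?_, ?_⟩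
      · intro h0; omega
      · intro _; exact le_trans (by omega) A2

lemma sum_le_of_inv (scores r : List Int) (hInv : AInv scores r) :
    r.sum ≤ (scores.length : Int) * (scores.length + 1) := by
  obtain ⟨hlen, hbnd⟩ := hInv
  have hall : ∀ x ∈ r, x ≤ (scores.length : Int) + 1 := by
    intro x hx
    obtain ⟨k, hk, rfl⟩ := List.mem_iff_getElem.mp hx
    have hkn : k < scores.length := by omega
    have h1 := (hbnd k hkn).2
    have hb := chainM_le_bound scores k
    rw [List.getD_eq_getElem r 0 hk] at h1
    omega
  have h2 := List.sum_le_card_nsmul r _ hall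
  rw [hlen, nsmul_eq_mul] at h2
  calc r.sum ≤ (scores.length : Int) * ((scores.length : Int) + 1) := h2
    _ = (scores.length : Int) * ((scores.length : Int) + 1) := rfl

lemma aLoop_fix (scores : List Int) :
    ∀ (fuel : Nat) (r : List Int), AInv scores r →
    (scores.length : Int) * (scores.length + 1) < r.sum + fuel →
    AInv scores (aLoop scores fuel r) ∧ ∀ i < scores.length, NoViol scores (aLoop scores fuel r) i := by
  intro fuel
  induction fuel with
  | zero =>
    intro r hInv hlt
    exfalso
    have := sum_le_of_inv scores r hInv
    push_cast at hlt
    omega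
  | succ fuel ih =>
    intro r hInv hlt
    have hmem : ∀ i ∈ List.range scores.length, i < scores.length :=
      fun i h => List.mem_range.mp h
    obtain ⟨A1, A2, A3, A4, A5⟩ :=
      aFold_facts scores (List.range scores.length) r 0 hmem hInv
    simp only [aLoop, aPass]
    by_cases h0 : ((List.range scores.length).foldl (aStep scores) (r, 0)).2 = 0
    · rw [if_pos h0]
      obtain ⟨hre, hnv⟩ := A4 h0
      rw [hre]
      exact ⟨hInv, fun i hi => hnv i (List.mem_range.mpr hi)⟩
    · rw [if_neg h0]
      apply ih _ A1
      have h5 := A5 h0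
      push_cast at hlt ⊢
      omega

lemma fix_ge (scores r : List Int) (hInv : AInv scores r)
    (hfix : ∀ i < scores.length, NoViol scores r i) :
    ∀ (k i : Nat), mu scores i ≤ k → i < scores.length → chainM scores i ≤ r.getD i 0 := by
  intro k
  induction k with
  | zero =>
    intro i hmu hi
    rw [chainM_eq]
    have h1 : ¬ scores.getD ((i + scores.length - 1) % scores.length) 0 < scores.getD i 0 := by
      intro hc
      have := mu_lt scores i _ (Nat.mod_lt _ (getD_lt_pos scores i _ hc)) hc
      omega
    have h2 : ¬ scores.getD ((i + 1) % scores.length) 0 < scores.getD i 0 := by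
      intro hc
      have := mu_lt scores i _ (Nat.mod_lt _ (getD_lt_pos scores i _ hc)) hc
      omega
    rw [if_neg h1, if_neg h2]
    have := (hInv.2 i hi).1
    omega
  | succ k ih =>
    intro i hmu hi
    rw [chainM_eq]
    obtain ⟨hv1, hv2⟩ := hfix i hi
    have hone := (hInv.2 i hi).1
    refine max_le hone (max_le ?_ ?_)
    · split_ifs with hc
      · have hlt := mu_lt scores i _ (Nat.mod_lt _ (getD_lt_pos scores i _ hc)) hc
        have hlf := ih ((i + scores.length - 1) % scores.length) (by omega)
          (Nat.mod_lt _ (by omega))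
        have hgt : ¬ r.getD i 0 ≤ r.getD ((i + scores.length - 1) % scores.length) 0 :=
          fun hle => hv1 ⟨hc, hle⟩
        omega
      · omega
    · split_ifs with hc
      · have hlt := mu_lt scores i _ (Nat.mod_lt _ (getD_lt_pos scores i _ hc)) hc
        have hrt := ih ((i + 1) % scores.length) (by omega) (Nat.mod_lt _ (by omega))
        have hgt : ¬ r.getD i 0 ≤ r.getD ((i + 1) % scores.length) 0 :=
          fun hle => hv2 ⟨hc, hle⟩
        omega
      · omega

-- both ports' final arrays are (range n).map (chainM scores)
lemma eq_map_chain (scores r : List Int) (hlen : r.length = scores.length)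
    (h : ∀ i < scores.length, r.getD i 0 = chainM scores i) :
    r = (List.range scores.length).map (chainM scores) := by
  apply List.ext_getElem
  · simp [hlen]
  · intro i h1 h2
    have hi : i < scores.length := by omega
    have hv := h i hi
    rw [List.getD_eq_getElem r 0 h1] at hv
    simp only [List.getElem_map, List.getElem_range]
    exact hv

lemma getD_replicate_one (n i : Nat) (h : i < n) :
    (List.replicate n (1 : Int)).getD i 0 = 1 := by
  rw [List.getD_eq_getElem _ _ (by simpa using h)]
  simp

lemma rewards_eq (scores : List Int) :
    rewards scores = ((List.range scores.length).map (chainM scores)).sum := by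
  unfold rewards
  have hInv0 : AInv scores (List.replicate scores.length 1) := by
    refine ⟨by simp, ?_⟩
    intro i hi
    rw [getD_replicate_one _ _ hi]
    exact ⟨le_refl _, one_le_chainM scores i⟩
  have hsum0 : (List.replicate scores.length (1 : Int)).sum = (scores.length : Int) := by
    simp
  have hlt : (scores.length : Int) * (scores.length + 1) <
      (List.replicate scores.length (1 : Int)).sum +
        ((scores.length * scores.length + 1 : Nat) : Int) := by
    rw [hsum0]
    push_cast
    nlinarith [sq_nonneg ((scores.length : Int))]
  obtain ⟨hIf, hNv⟩ := aLoop_fix scores (scores.length * scores.length + 1) _ hInv0 hlt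
  have hpt : ∀ i < scores.length,
      (aLoop scores (scores.length * scores.length + 1)
        (List.replicate scores.length 1)).getD i 0 = chainM scores i := by
    intro i hi
    exact le_antisymm ((hIf.2 i hi).2)
      (fix_ge scores _ hIf hNv (mu scores i) i le_rfl hi)
  rw [eq_map_chain scores _ hIf.1 hpt]

lemma bFold (scores : List Int) :
    ∀ (suf done : List Nat) (r : List Int),
      r.length = scores.length →
      (done ++ suf).Perm (List.range scores.length) →
      suf.Pairwise (fun a b => scores.getD a 0 ≤ scores.getD b 0) →
      (∀ j ∈ done, r.getD j 0 = chainM scores j) →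
      (∀ j < scores.length, j ∉ done → r.getD j 0 = 1) →
      (suf.foldl (bStep scores) r).length = scores.length ∧
      ∀ j < scores.length, (suf.foldl (bStep scores) r).getD j 0 = chainM scores j := by
  intro suf
  induction suf with
  | nil =>
    intro done r hlen hperm _ hdone _
    simp only [List.foldl_nil]
    refine ⟨hlen, fun j hj => hdone j ?_⟩
    have hm : j ∈ done ++ ([] : List Nat) :=
      hperm.mem_iff.mpr (List.mem_range.mpr hj)
    simpa using hm
  | cons i tl ih =>
    intro done r hlen hperm hpw hdone hrest
    have hnd : (done ++ i :: tl).Nodup := hperm.symm.nodup List.nodup_range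
    have hi_n : i < scores.length :=
      List.mem_range.mp (hperm.subset (by simp))
    have hir : i < r.length := by omega
    have hdisj := List.disjoint_of_nodup_append hnd
    have hi_not_done : i ∉ done := fun h => hdisj h (by simp)
    have hi_not_tl : i ∉ tl := (List.nodup_cons.mp (hnd.of_append_right)).1
    have hnbr : ∀ j, j < scores.length → scores.getD j 0 < scores.getD i 0 → j ∈ done := by
      intro j hj hltj
      have hjmem : j ∈ done ++ i :: tl := hperm.mem_iff.mpr (List.mem_range.mpr hj)
      rcases List.mem_append.mp hjmem with h | h
      · exact h
      · rcases List.mem_cons.mp h with rfl | h2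
        · exact absurd hltj (lt_irrefl _)
        · have := (List.pairwise_cons.mp hpw).1 j h2
          omega
    have hstep : bStep scores r i = r.set i (chainM scores i) := by
      simp only [bStep]
      congr 1
      split_ifs with c2 c1 c1
      · have hdl := hdone _ (hnbr _ (Nat.mod_lt _ (by omega)) c1)
        have hdr := hdone _ (hnbr _ (Nat.mod_lt _ (by omega)) c2)
        rw [chainM_eq scores i, if_pos c1, if_pos c2, hdl, hdr]
        omega
      · have hdr := hdone _ (hnbr _ (Nat.mod_lt _ (by omega)) c2)
        rw [chainM_eq scores i, if_neg c1, if_pos c2, hdr]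
        omega
      · have hdl := hdone _ (hnbr _ (Nat.mod_lt _ (by omega)) c1)
        rw [chainM_eq scores i, if_pos c1, if_neg c2, hdl]
        omega
      · rw [chainM_eq scores i, if_neg c1, if_neg c2]
        omega
    simp only [List.foldl_cons, hstep]
    apply ih (done ++ [i])
    · simp [hlen]
    · rw [List.append_assoc, List.singleton_append]
      exact hperm
    · exact (List.pairwise_cons.mp hpw).2
    · intro j hj
      rcases List.mem_append.mp hj with h | h
      · have hji : j ≠ i := fun he => hi_not_done (he ▸ h)
        rw [getD_set_ne _ _ _ _ hji]
        exact hdone j h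
      · have : j = i := by simpa using h
        subst this
        exact getD_set_self _ _ _ hir
    · intro j hj hjnot
      have hji : j ≠ i := fun he => hjnot (by simp [he])
      rw [getD_set_ne _ _ _ _ hji]
      exact hrest j hj (fun h => hjnot (List.mem_append.mpr (Or.inl h)))

lemma rewards_alt_eq (scores : List Int) :
    rewards_alt scores = ((List.range scores.length).map (chainM scores)).sum := by
  show ((PySem.List.sorted (List.range scores.length) (fun i => scores.getD i 0)
      false).foldl (bStep scores) (List.replicate scores.length 1)).sum =
    ((List.range scores.length).map (chainM scores)).sum
  have hperm : (([] : List Nat) ++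
      PySem.List.sorted (List.range scores.length) (fun i => scores.getD i 0) false).Perm
      (List.range scores.length) := by
    simpa using PySem.List.sorted_perm (List.range scores.length)
      (fun i => scores.getD i 0) false
  obtain ⟨hl, hpt⟩ := bFold scores
    (PySem.List.sorted (List.range scores.length) (fun i => scores.getD i 0) false)
    [] (List.replicate scores.length 1) (by simp) hperm
    (PySem.List.sorted_pairwise (List.range scores.length) (fun i => scores.getD i 0))
    (by intro j hj; simp at hj)
    (by intro j hj _; exact getD_replicate_one _ _ hj)
  rw [eq_map_chain scores _ hl hpt]

-- ===== VERDICT =====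
theorem rewards_spec : Claim_equal_rewards := by
  intro scores _
  unfold Spec_rewards
  rw [rewards_eq, rewards_alt_eq]
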